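-- pv_equiv track=rewrite | github.com/anupyadav27/threat-engine | engines/secops/dast_engine/report/sarif_reporter.py | _type_to_rule_id
-- ===== SOURCE A (Python) =====
-- def _type_to_rule_id(vuln_type: str) -> str:
--     """Convert a vulnerability type string to a compact SARIF rule ID."""
--     replacements = {
--         ' ': '-', '/': '-', '(': '', ')': '',
--         "'": '', '"': '', ',': '', '.': '',
--     }
--     rid = vuln_type
--     for char, replacement in replacements.items():
--         rid = rid.replace(char, replacement)
--     # Collapse multiple hyphens
--     while '--' in rid:
--         rid = rid.replace('--', '-')
--     return rid.strip('-').upper()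
-- ===== SOURCE B (Python) =====
-- def _type_to_rule_id(vuln_type: str) -> str:
--     """Convert a vulnerability type string to a compact SARIF rule ID."""
--     out = []
--     for c in vuln_type:
--         if c == ' ' or c == '/':
--             c = '-'
--         if c in "()'\",.":
--             continue
--         if c == '-' and out and out[-1] == '-':
--             continue
--         out.append(c)
--     return ''.join(out).strip('-').upper()
-- ===== Notes on version B (the rewrite author's own statement) =====
-- stated objective: alternative
-- what changed: Replaces eight whole-string .replace passes plus a rescanning while-loop that collapses double hyphens by a single left-to-right pass that maps, drops and collapses hyphen runs inline using only the last emitted character.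
import Mathlib
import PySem

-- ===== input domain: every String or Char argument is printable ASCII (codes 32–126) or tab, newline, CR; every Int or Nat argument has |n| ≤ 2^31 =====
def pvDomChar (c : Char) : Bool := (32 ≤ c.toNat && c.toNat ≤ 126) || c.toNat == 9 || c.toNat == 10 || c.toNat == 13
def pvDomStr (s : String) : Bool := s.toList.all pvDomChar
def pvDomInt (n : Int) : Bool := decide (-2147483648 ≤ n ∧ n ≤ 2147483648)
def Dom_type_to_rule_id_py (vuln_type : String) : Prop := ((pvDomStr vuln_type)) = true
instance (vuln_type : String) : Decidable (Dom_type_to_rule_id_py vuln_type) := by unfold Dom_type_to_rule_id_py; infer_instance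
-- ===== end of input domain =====

-- B replaces A's eight whole-string replace passes plus the rescanning double-hyphen collapse loop by a
-- single left-to-right pass over the characters that maps/drops characters and collapses
-- hyphen runs inline using only the last emitted character (objective: alternative).


-- ===== PORT A =====
-- the while-loop collapsing double hyphens; the fuel only makes the recursion total: each iteration
-- strictly shortens rid, so rid.length + 1 iterations always suffice (proved below).
def typeToRuleCollapse : Nat → List Char → List Char
  | 0, rid => rid
  | fuel + 1, rid =>
    if PySem.Chars.isIn ['-', '-'] rid then
      typeToRuleCollapse fuel (PySem.Chars.replace rid ['-', '-'] ['-'])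
    else rid

def type_to_rule_id_py (vuln_type : String) : String :=
  -- rid = vuln_type; then the eight dict entries applied by str.replace in insertion order
  let rid := vuln_type.toList
  let rid := PySem.Chars.replace rid [' '] ['-']
  let rid := PySem.Chars.replace rid ['/'] ['-']
  let rid := PySem.Chars.replace rid ['('] []
  let rid := PySem.Chars.replace rid [')'] []
  let rid := PySem.Chars.replace rid ['\''] []
  let rid := PySem.Chars.replace rid ['"'] []
  let rid := PySem.Chars.replace rid [','] []
  let rid := PySem.Chars.replace rid ['.'] []
  let rid := typeToRuleCollapse (rid.length + 1) rid
  String.ofList (PySem.Chars.upper (PySem.Chars.stripChars rid ['-']))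

-- ===== PORT B =====
-- one step of B's single pass: map ' '/'/' to '-', drop punctuation, append unless that
-- would extend a hyphen run (the out[-1] check)
def altStep (out : List Char) (c : Char) : List Char :=
  let c := if c = ' ' ∨ c = '/' then '-' else c
  if c = '(' ∨ c = ')' ∨ c = '\'' ∨ c = '"' ∨ c = ',' ∨ c = '.' then out
  else if c = '-' ∧ out.getLast? = some '-' then out
  else out ++ [c]

def type_to_rule_id_py_alt (vuln_type : String) : String :=
  String.ofList (PySem.Chars.upper (PySem.Chars.stripChars (vuln_type.toList.foldl altStep []) ['-']))

-- ===== PRECONDITION & SPEC =====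
def Spec_type_to_rule_id_py (vuln_type : String) (out : String) : Prop := out = type_to_rule_id_py_alt vuln_type
instance (vuln_type : String) (out : String) : Decidable (Spec_type_to_rule_id_py vuln_type out) := by unfold Spec_type_to_rule_id_py; infer_instance

-- ===== CLAIM (what is proved, stated in full; the proofs are below) =====
def Claim_equal_type_to_rule_id_py : Prop := ∀ (vuln_type : String), Dom_type_to_rule_id_py vuln_type → Spec_type_to_rule_id_py vuln_type (type_to_rule_id_py vuln_type)

-- ===== LEMMAS AND PROOFS =====

/-- One pass of `rid.replace('--', '-')`. -/
def rep2 : List Char → List Char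
  | [] => []
  | [c] => [c]
  | a :: b :: t => if a = '-' ∧ b = '-' then '-' :: rep2 t else a :: rep2 (b :: t)

/-- Inline hyphen-run collapse with "last emitted char was '-'" state. -/
def sqz : Bool → List Char → List Char
  | _, [] => []
  | b, c :: t => if c = '-' then (if b then sqz true t else '-' :: sqz true t) else c :: sqz false t

/-- The per-character effect of A's whole replacement chain. -/
def Fm (c : Char) : List Char :=
  if c = '(' ∨ c = ')' ∨ c = '\'' ∨ c = '"' ∨ c = ',' ∨ c = '.' then []
  else [if c = ' ' ∨ c = '/' then '-' else c]

theorem go_single (a : Char) (new : List Char) : ∀ (fuel : Nat) (l acc : List Char), l.length ≤ fuel →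
    PySem.Chars.replace.go [a] new fuel l acc = acc.reverse ++ l.flatMap (fun c => if c = a then new else [c]) := by
  intro fuel
  induction fuel with
  | zero => intro l acc h
            have : l = [] := List.eq_nil_of_length_eq_zero (Nat.le_zero.mp h)
            subst this; simp [PySem.Chars.replace.go]
  | succ n ih =>
    intro l acc h
    cases l with
    | nil => simp [PySem.Chars.replace.go]
    | cons c t =>
      rw [PySem.Chars.replace.go]
      by_cases hc : c = a
      · subst hc
        simp only [List.isPrefixOf, BEq.rfl, Bool.true_and, if_true]
        rw [ih _ _ (by simpa using Nat.le_of_succ_le_succ h)]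
        simp
      · have : ([a].isPrefixOf (c :: t)) = false := by
          simp [List.isPrefixOf]; exact fun h' => absurd h'.symm hc
        rw [if_neg (by simp [this])]
        rw [ih _ _ (by simpa using Nat.le_of_succ_le_succ h)]
        simp [hc]

theorem replace_single (a : Char) (new s : List Char) :
    PySem.Chars.replace s [a] new = s.flatMap (fun c => if c = a then new else [c]) := by
  rw [PySem.Chars.replace]
  rw [if_neg (by simp)]
  exact (go_single a new s.length s [] (le_refl _)).trans (by simp)

theorem go_dd : ∀ (fuel : Nat) (l acc : List Char), l.length ≤ fuel →
    PySem.Chars.replace.go ['-','-'] ['-'] fuel l acc = acc.reverse ++ rep2 l := by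
  intro fuel
  induction fuel with
  | zero => intro l acc h
            have : l = [] := List.eq_nil_of_length_eq_zero (Nat.le_zero.mp h)
            subst this; simp [PySem.Chars.replace.go, rep2]
  | succ n ih =>
    intro l acc h
    cases l with
    | nil => simp [PySem.Chars.replace.go, rep2]
    | cons c t =>
      rw [PySem.Chars.replace.go]
      cases t with
      | nil =>
        rw [if_neg (by simp [List.isPrefixOf])]
        rw [ih _ _ (by simpa using Nat.le_of_succ_le_succ h)]
        simp [rep2]
      | cons b u =>
        by_cases hc : c = '-' ∧ b = '-'
        · obtain ⟨hc1, hc2⟩ := hc; subst hc1; subst hc2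
          rw [if_pos (by simp [List.isPrefixOf])]
          simp only [List.length_cons, List.drop_succ_cons, List.drop_zero, List.drop_one]
          rw [ih _ _ (by simp at h ⊢; omega)]
          simp [rep2, List.tail]
        · rw [if_neg (by simp [List.isPrefixOf]; intro h1 h2; exact hc ⟨h1.symm, h2.symm⟩)]
          rw [ih _ _ (by simp at h ⊢; omega)]
          rw [rep2, if_neg hc]
          simp
theorem rep2_eq (s : List Char) : PySem.Chars.replace s ['-', '-'] ['-'] = rep2 s := by
  rw [PySem.Chars.replace]
  rw [if_neg (by simp)]
  exact (go_dd s.length s [] (le_refl _)).trans (by simp)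

theorem rep2_length_le (s : List Char) : (rep2 s).length ≤ s.length := by
  induction s using rep2.induct with
  | case1 => simp [rep2]
  | case2 c => simp [rep2]
  | case3 a b t h ih => rw [rep2, if_pos h]; simp at ih ⊢; omega
  | case4 a b t h ih => rw [rep2, if_neg h]; simp at ih ⊢; omega

theorem rep2_length_lt (s : List Char) (h : ['-', '-'] <:+: s) : (rep2 s).length < s.length := by
  induction s using rep2.induct with
  | case1 => simp at h
  | case2 c => have := h.length_le; simp at this
  | case3 a b t hab ih =>
    rw [rep2, if_pos hab]
    have := rep2_length_le t; simp; omega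
  | case4 a b t hab ih =>
    rw [rep2, if_neg hab]
    rcases List.infix_cons_iff.mp h with hp | hi
    · obtain ⟨u, hu⟩ := hp
      simp at hu
      exact absurd ⟨hu.1.symm, hu.2.1.symm⟩ hab
    · have := ih hi; simp at this ⊢; omega

theorem sqz_rep2 (s : List Char) : ∀ b, sqz b (rep2 s) = sqz b s := by
  induction s using rep2.induct with
  | case1 => intro b; rfl
  | case2 c => intro b; rfl
  | case3 a b t hab ih =>
    intro v
    obtain ⟨h1, h2⟩ := hab; subst h1; subst h2
    rw [rep2, if_pos ⟨rfl, rfl⟩]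
    cases v <;> simp [sqz.eq_2, ih]
  | case4 a b t hab ih =>
    intro v
    rw [rep2, if_neg hab]
    by_cases ha : a = '-'
    · subst ha
      cases v <;> simp [sqz.eq_2, ih]
    · simp only [sqz, if_neg ha, ih]

theorem sqz_of_no_dd : ∀ (s : List Char), ¬ (['-', '-'] <:+: s) →
    ∀ b : Bool, (b = true → s.head? ≠ some '-') → sqz b s = s := by
  intro s
  induction s with
  | nil => intro _ b _; rfl
  | cons c t ih =>
    intro h b hb
    by_cases hc : c = '-'
    · subst hc
      have hbf : b = false := by
        cases b with
        | false => rfl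
        | true => exact (hb rfl (by simp)).elim
      subst hbf
      have hnt : ¬ (['-','-'] <:+: t) := fun h' => h (List.infix_cons_iff.mpr (Or.inr h'))
      have hht : t.head? ≠ some '-' := by
        intro hh
        cases t with
        | nil => simp at hh
        | cons d u =>
          simp at hh; subst hh
          exact h (List.infix_cons_iff.mpr (Or.inl ⟨u, rfl⟩))
      simp [sqz.eq_2, ih hnt true (fun _ => hht)]
    · have hnt : ¬ (['-','-'] <:+: t) := by
        intro h'; exact h (List.infix_cons_iff.mpr (Or.inr h'))
      simp [sqz.eq_2, hc, ih hnt false (by simp)]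

theorem collapse_eq_sqz : ∀ (fuel : Nat) (s : List Char), s.length < fuel →
    typeToRuleCollapse fuel s = sqz false s := by
  intro fuel
  induction fuel with
  | zero => intro s h; omega
  | succ n ih =>
    intro s h
    rw [typeToRuleCollapse]
    by_cases hin : PySem.Chars.isIn ['-', '-'] s = true
    · rw [if_pos hin, rep2_eq]
      have hinf := (PySem.Chars.isIn_iff_infix _ _).mp hin
      have hlt := rep2_length_lt s hinf
      rw [ih _ (by omega), sqz_rep2]
    · rw [if_neg hin]
      have hninf := (PySem.Chars.isIn_eq_false_iff _ _).mp (by simpa using hin)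
      exact (sqz_of_no_dd s hninf false (by simp)).symm

theorem foldl_altStep : ∀ (s : List Char) (out : List Char),
    s.foldl altStep out = out ++ sqz (decide (out.getLast? = some '-')) (s.flatMap Fm) := by
  intro s
  induction s with
  | nil => intro out; simp [sqz]
  | cons c t ih =>
    intro out
    rw [List.foldl_cons, List.flatMap_cons, ih]
    by_cases hsp : c = ' ' ∨ c = '/'
    · have hpunct : ¬(c = '(' ∨ c = ')' ∨ c = '\'' ∨ c = '"' ∨ c = ',' ∨ c = '.') := by
        rcases hsp with rfl | rfl <;> simp
      by_cases hlast : out.getLast? = some '-'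
      · simp [altStep, Fm, hsp, hpunct, hlast, sqz.eq_2]
      · simp [altStep, Fm, hsp, hpunct, hlast, sqz.eq_2, List.getLast?_concat]
    · by_cases hpunct : c = '(' ∨ c = ')' ∨ c = '\'' ∨ c = '"' ∨ c = ',' ∨ c = '.'
      · simp [altStep, Fm, hsp, hpunct]
      · by_cases hdash : c = '-'
        · subst hdash
          by_cases hlast : out.getLast? = some '-'
          · simp [altStep, Fm, hsp, hpunct, hlast, sqz.eq_2]
          · simp [altStep, Fm, hsp, hpunct, hlast, sqz.eq_2, List.getLast?_concat]
        · simp [altStep, Fm, hsp, hpunct, hdash, sqz.eq_2, List.getLast?_concat]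


-- ===== VERDICT (by name: the statement is the Claim_ definition above) =====
theorem type_to_rule_id_py_spec : Claim_equal_type_to_rule_id_py := by
  intro s _
  unfold Spec_type_to_rule_id_py type_to_rule_id_py type_to_rule_id_py_alt
  dsimp only
  have hchain : (PySem.Chars.replace (PySem.Chars.replace (PySem.Chars.replace (PySem.Chars.replace (PySem.Chars.replace (PySem.Chars.replace (PySem.Chars.replace (PySem.Chars.replace s.toList [' '] ['-']) ['/'] ['-']) ['('] []) [')'] []) ['\''] []) ['"'] []) [','] []) ['.'] []) = s.toList.flatMap Fm := by
    simp only [replace_single, List.flatMap_assoc]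
    apply List.flatMap_congr
    intro c _
    by_cases hsp : c = ' ' ∨ c = '/'
    · rcases hsp with rfl | rfl <;> simp [Fm]
    · by_cases hpunct : c = '(' ∨ c = ')' ∨ c = '\'' ∨ c = '"' ∨ c = ',' ∨ c = '.'
      · rcases hpunct with rfl | rfl | rfl | rfl | rfl | rfl <;> simp [Fm]
      · push_neg at hsp hpunct
        simp [Fm, hsp.1, hsp.2, hpunct.1, hpunct.2.1, hpunct.2.2.1, hpunct.2.2.2.1,
          hpunct.2.2.2.2.1, hpunct.2.2.2.2.2]
  rw [hchain, collapse_eq_sqz _ _ (by omega), foldl_altStep]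
  simp
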